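-- pv_equiv track=rewrite | github.com/pythoner-jing/Algorithm | cantor.py | cantor
-- ===== SOURCE A (Python) =====
-- fac = [1, 1, 2, 6, 24, 120, 720, 5040, 40320, 362880]
--
-- m = len(fac)
--
-- def factorial(x):
-- 	if x == 0 or x == 1:
-- 		return 1
-- 	else:
-- 		return x * factorial(x - 1)
--
-- def cantor(lst):
-- 	tmp = None
-- 	n = len(lst)
-- 	num = 0
-- 	for i in range(n):
-- 		tmp = 0
-- 		for j in range(i + 1, n):
-- 			if lst[j] < lst[i]:
-- 				tmp += 1
-- 		if(n - i - 1 < m):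
-- 			num += fac[n - i - 1] * tmp
-- 		else:
-- 			num += factorial(n - i - 1) * tmp
-- 	return num + 1
-- ===== SOURCE B (Python) =====
-- def cantor(lst):
--     num = 0
--     f = 1
--     k = 0
--     seen = []  # sorted list of elements already processed (the suffix)
--     for x in reversed(lst):
--         c = 0
--         while c < len(seen) and seen[c] < x:
--             c += 1
--         num += c * f
--         seen = seen[:c] + [x] + seen[c:]
--         k += 1
--         f *= k
--     return num + 1
-- ===== Notes on version B (the rewrite author's own statement) =====
-- stated objective: alternative
-- what changed: B replaces A's nested right-scan per position plus factorial table/recursive factorial with a single right-to-left pass that maintains a sorted list of already-seen suffix elements (the insertion point gives the count of smaller elements) and an incrementally updated factorial weight.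
import Mathlib
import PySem

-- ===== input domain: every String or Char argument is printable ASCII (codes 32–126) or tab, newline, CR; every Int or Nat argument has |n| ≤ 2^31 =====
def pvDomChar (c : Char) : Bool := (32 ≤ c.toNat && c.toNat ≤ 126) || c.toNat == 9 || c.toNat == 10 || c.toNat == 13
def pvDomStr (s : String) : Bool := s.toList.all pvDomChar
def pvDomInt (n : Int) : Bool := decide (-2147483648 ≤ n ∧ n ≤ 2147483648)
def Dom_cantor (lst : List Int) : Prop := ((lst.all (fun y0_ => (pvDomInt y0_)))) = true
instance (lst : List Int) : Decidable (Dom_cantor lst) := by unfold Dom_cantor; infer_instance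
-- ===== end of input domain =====

-- B replaces A's nested rescans and factorial table/recursion with one right-to-left pass
-- keeping a sorted list of seen elements and an incrementally updated factorial (objective: alternative).

-- ===== PORT A =====
-- fac = [1, 1, 2, 6, 24, 120, 720, 5040, 40320, 362880]
def facA : List Int := [1, 1, 2, 6, 24, 120, 720, 5040, 40320, 362880]

-- factorial(x); A only calls it with x = n-i-1 ≥ 0, so a Nat argument is exact here
def factorialA : Nat → Int
  | 0 => 1
  | 1 => 1
  | (n+2) => ((n : Int) + 2) * factorialA (n+1)

-- literal port of A: for i in range(n): tmp = count of lst[j] < lst[i] for j in range(i+1,n);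
-- indices are in range, so lst.getD j 0 = lst[j]; range(i+1,n) = List.range' (i+1) (n-(i+1)) (bounds are Nats)
def cantor (lst : List Int) : Int :=
  let n := lst.length
  let num := (List.range n).foldl
    (fun num i =>
      let tmp := (List.range' (i+1) (n - (i+1))).foldl
        (fun tmp j => if lst.getD j 0 < lst.getD i 0 then tmp + 1 else tmp) (0 : Int)
      if n - i - 1 < facA.length then num + facA.getD (n - i - 1) 0 * tmp
      else num + factorialA (n - i - 1) * tmp) (0 : Int)
  num + 1

-- ===== PORT B =====
-- the while loop: number of leading elements of seen that are < x
def countLess : List Int → Int → Nat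
  | [], _ => 0
  | y :: ys, x => if y < x then countLess ys x + 1 else 0

def stepB (st : Int × Int × Int × List Int) (x : Int) : Int × Int × Int × List Int :=
  let c := countLess st.2.2.2 x
  (st.1 + (c : Int) * st.2.1, st.2.1 * (st.2.2.1 + 1), st.2.2.1 + 1,
   st.2.2.2.take c ++ [x] ++ st.2.2.2.drop c)

def cantor_alt (lst : List Int) : Int :=
  (lst.reverse.foldl stepB (0, 1, 0, [])).1 + 1

-- ===== PRECONDITION & SPEC =====
def Spec_cantor (lst : List Int) (out : Int) : Prop := out = cantor_alt lst
instance (lst : List Int) (out : Int) : Decidable (Spec_cantor lst out) := by unfold Spec_cantor; infer_instance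

-- ===== CLAIM (what is proved, stated in full; the proofs are below) =====
def Claim_equal_cantor : Prop := ∀ (lst : List Int), Dom_cantor lst → Spec_cantor lst (cantor lst)

-- ===== LEMMAS AND PROOFS =====
-- common specification: the Cantor rank minus one, structurally
def specN : List Int → Int
  | [] => 0
  | x :: xs => (xs.countP (fun y => decide (y < x)) : Int) * factorialA xs.length + specN xs

def insSorted (x : Int) (s : List Int) : List Int :=
  s.take (countLess s x) ++ [x] ++ s.drop (countLess s x)

def seenOf : List Int → List Int
  | [] => []
  | x :: xs => insSorted x (seenOf xs)

theorem factorialA_succ (n : Nat) : factorialA (n + 1) = factorialA n * ((n : Int) + 1) := by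
  cases n with
  | zero => simp [factorialA]
  | succ m => simp [factorialA]; ring

theorem weight_eq (k : Nat) : (if k < facA.length then facA.getD k 0 else factorialA k) = factorialA k := by
  split
  · rename_i h
    simp only [facA, List.length_cons, List.length_nil] at h
    interval_cases k <;> decide
  · rfl

theorem insSorted_perm (x : Int) (s : List Int) : (insSorted x s).Perm (x :: s) := by
  unfold insSorted
  have := List.perm_middle (a := x) (l₁ := s.take (countLess s x)) (l₂ := s.drop (countLess s x))
  simpa [List.take_append_drop] using this

theorem insSorted_sorted (x : Int) (s : List Int) (hs : s.Sorted (· ≤ ·)) :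
    (insSorted x s).Sorted (· ≤ ·) := by
  induction s with
  | nil => simp [insSorted, countLess, List.Sorted]
  | cons y ys ih =>
    have hys : ys.Sorted (· ≤ ·) := (List.sorted_cons.mp hs).2
    have hy : ∀ b ∈ ys, y ≤ b := (List.sorted_cons.mp hs).1
    unfold insSorted countLess
    by_cases h : y < x
    · simp only [h, if_pos, List.take_succ_cons, List.drop_succ_cons, List.cons_append]
      rw [List.sorted_cons]
      constructor
      · intro b hb
        have hb' : b ∈ insSorted x ys := by simpa [insSorted] using hb
        have := (insSorted_perm x ys).mem_iff.mp hb'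
        rcases List.mem_cons.mp this with h1 | h2
        · exact h1 ▸ le_of_lt h
        · exact hy b h2
      · exact ih hys
    · simp only [h, if_neg, not_false_iff, List.take_zero, List.drop_zero, List.nil_append,
        List.singleton_append]
      rw [List.sorted_cons]
      refine ⟨?_, hs⟩
      intro b hb
      rcases List.mem_cons.mp hb with h1 | h2
      · exact h1 ▸ le_of_not_gt h
      · exact le_trans (le_of_not_gt h) (hy b h2)

theorem seenOf_perm (lst : List Int) : (seenOf lst).Perm lst := by
  induction lst with
  | nil => simp [seenOf]
  | cons x xs ih => exact ((insSorted_perm x (seenOf xs)).trans (ih.cons x))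

theorem seenOf_sorted (lst : List Int) : (seenOf lst).Sorted (· ≤ ·) := by
  induction lst with
  | nil => simp [seenOf, List.Sorted]
  | cons x xs ih => exact insSorted_sorted x (seenOf xs) ih

theorem countLess_eq_countP (s : List Int) (x : Int) (hs : s.Sorted (· ≤ ·)) :
    countLess s x = s.countP (fun y => decide (y < x)) := by
  induction s with
  | nil => simp [countLess]
  | cons y ys ih =>
    have hys : ys.Sorted (· ≤ ·) := (List.sorted_cons.mp hs).2
    have hy : ∀ b ∈ ys, y ≤ b := (List.sorted_cons.mp hs).1
    by_cases h : y < x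
    · simp [countLess, h, ih hys]
    · have : ∀ b ∈ ys, ¬ b < x := fun b hb hlt =>
        h (lt_of_le_of_lt (hy b hb) hlt)
      have hzero : ys.countP (fun y => decide (y < x)) = 0 := by
        rw [List.countP_eq_zero]
        intro b hb
        simpa using this b hb
      simp [countLess, h, hzero]

theorem B_state (lst : List Int) :
    lst.reverse.foldl stepB (0, 1, 0, []) =
      (specN lst, factorialA lst.length, (lst.length : Int), seenOf lst) := by
  induction lst with
  | nil => simp [specN, factorialA, seenOf]
  | cons x xs ih =>
    have : (x :: xs).reverse = xs.reverse ++ [x] := by simp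
    rw [this, List.foldl_append, ih]
    simp only [List.foldl_cons, List.foldl_nil, stepB, specN, seenOf, insSorted,
      List.length_cons]
    have hc : countLess (seenOf xs) x = xs.countP (fun y => decide (y < x)) := by
      rw [countLess_eq_countP _ _ (seenOf_sorted xs)]
      exact (seenOf_perm xs).countP_eq _
    refine Prod.ext ?_ (Prod.ext ?_ (Prod.ext ?_ rfl))
    · simp [hc]; ring
    · simp [factorialA_succ]
    · simp

theorem cantor_alt_eq (lst : List Int) : cantor_alt lst = specN lst + 1 := by
  unfold cantor_alt
  rw [B_state]

-- A side --------------------------------------------------------------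
theorem foldl_add_sum (g : Nat → Int) (n : Nat) :
    ∀ c : Int, (List.range n).foldl (fun a i => a + g i) c = c + ∑ i ∈ Finset.range n, g i := by
  induction n with
  | zero => simp
  | succ m ih =>
    intro c
    rw [List.range_succ, List.foldl_append, ih, Finset.sum_range_succ]
    simp [add_assoc]

theorem inner_fold (lst : List Int) (v : Int) :
    ∀ (m s : Nat), s + m = lst.length → ∀ cnt : Int,
      (List.range' s m).foldl (fun t j => if lst.getD j 0 < v then t + 1 else t) cnt =
        cnt + ((lst.drop s).countP (fun y => decide (y < v)) : Int) := by
  intro m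
  induction m with
  | zero =>
    intro s hs cnt
    have : lst.drop s = [] := by
      apply List.drop_eq_nil_of_le; omega
    simp [this]
  | succ k ih =>
    intro s hs cnt
    have hlt : s < lst.length := by omega
    have hdrop : lst.drop s = lst[s] :: lst.drop (s+1) := List.drop_eq_getElem_cons hlt
    have hget : lst.getD s 0 = lst[s] := List.getD_eq_getElem lst 0 hlt
    rw [List.range'_succ, List.foldl_cons, ih (s+1) (by omega)]
    rw [hdrop, List.countP_cons, hget]
    by_cases h : lst[s] < v <;> simp [h] <;> ring

theorem cantor_eq_sum (lst : List Int) :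
    cantor lst =
      (∑ i ∈ Finset.range lst.length,
        factorialA (lst.length - i - 1) *
          ((lst.drop (i+1)).countP (fun y => decide (y < lst.getD i 0)) : Int)) + 1 := by
  show ((List.range lst.length).foldl
    (fun num i =>
      let tmp := (List.range' (i+1) (lst.length - (i+1))).foldl
        (fun tmp j => if lst.getD j 0 < lst.getD i 0 then tmp + 1 else tmp) (0 : Int)
      if lst.length - i - 1 < facA.length then num + facA.getD (lst.length - i - 1) 0 * tmp
      else num + factorialA (lst.length - i - 1) * tmp) (0 : Int)) + 1 = _
  have h := List.foldl_ext
    (l := List.range lst.length)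
    (fun num i =>
      let tmp := (List.range' (i+1) (lst.length - (i+1))).foldl
        (fun tmp j => if lst.getD j 0 < lst.getD i 0 then tmp + 1 else tmp) (0 : Int)
      if lst.length - i - 1 < facA.length then num + facA.getD (lst.length - i - 1) 0 * tmp
      else num + factorialA (lst.length - i - 1) * tmp)
    (fun num i =>
      num + factorialA (lst.length - i - 1) *
          ((lst.drop (i+1)).countP (fun y => decide (y < lst.getD i 0)) : Int))
    (0 : Int) ?_
  · rw [h, foldl_add_sum]
    simp
  · intro a i hi
    have hi' : i < lst.length := List.mem_range.mp hi
    have hinner := inner_fold lst (lst.getD i 0) (lst.length - (i+1)) (i+1) (by omega) 0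
    simp only [hinner, zero_add]
    have hw := weight_eq (lst.length - i - 1)
    split_ifs with hlt
    · rw [if_pos hlt] at hw
      rw [hw]
    · rfl

theorem sum_eq_specN (lst : List Int) :
    (∑ i ∈ Finset.range lst.length,
        factorialA (lst.length - i - 1) *
          ((lst.drop (i+1)).countP (fun y => decide (y < lst.getD i 0)) : Int)) = specN lst := by
  induction lst with
  | nil => simp [specN]
  | cons x xs ih =>
    rw [List.length_cons, Finset.sum_range_succ']
    have hshift : ∀ i, factorialA (xs.length + 1 - (i+1) - 1) *
        (((x :: xs).drop (i+1+1)).countP (fun y => decide (y < (x :: xs).getD (i+1) 0)) : Int) =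
        factorialA (xs.length - i - 1) *
          ((xs.drop (i+1)).countP (fun y => decide (y < xs.getD i 0)) : Int) := by
      intro i
      simp [List.drop_succ_cons]
    rw [Finset.sum_congr rfl (fun i _ => hshift i), ih]
    simp [specN]
    ring

-- ===== VERDICT (by name: the statement is the Claim_ definition above) =====
theorem cantor_spec : Claim_equal_cantor := by
  intro lst _
  unfold Spec_cantor
  rw [cantor_eq_sum, sum_eq_specN, cantor_alt_eq]
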